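-- pv_equiv track=rewrite | github.com/plen276/cs701 | gp-1/recop-asm/asm.py | write_mif
-- ===== SOURCE A (Python) =====
-- from typing import Callable, Dict, List, Optional, Tuple
--
-- class AsmError(Exception):
--     pass
--
-- def write_mif(
--     instructions: List[Tuple[int, int]],
--     depth: int = 32768,
--     fill: int = 0x0000,
-- ) -> str:
--     mem: Dict[int, int] = {}
--     for pc, ir in instructions:
--         if pc + 1 >= depth:
--             raise AsmError(
--                 f"instruction at word {pc:#06x} exceeds memory depth {depth}"
--             )
--         mem[pc]     = (ir >> 16) & 0xFFFF
--         mem[pc + 1] =  ir        & 0xFFFF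
--
--     lines: List[str] = []
--     lines.append("WIDTH = 16;")
--     lines.append(f"DEPTH = {depth};")
--     lines.append("ADDRESS_RADIX = HEX;")
--     lines.append("DATA_RADIX = HEX;")
--     lines.append("")
--     lines.append("CONTENT BEGIN")
--     addrs = sorted(mem)
--     prev = -1
--     for a in addrs:
--         # emit a range line for any gap
--         if a > prev + 1 and prev + 1 < a:
--             if a - 1 > prev + 1:
--                 lines.append(f"    [{prev+1:04X}..{a-1:04X}] : {fill:04X};")
--             else:
--                 lines.append(f"    {prev+1:04X} : {fill:04X};")
--         lines.append(f"    {a:04X} : {mem[a]:04X};")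
--         prev = a
--     if prev + 1 < depth:
--         if prev + 1 == depth - 1:
--             lines.append(f"    {prev+1:04X} : {fill:04X};")
--         else:
--             lines.append(f"    [{prev+1:04X}..{depth-1:04X}] : {fill:04X};")
--     lines.append("END;")
--     return "\n".join(lines) + "\n"
-- ===== SOURCE B (Python) =====
-- from typing import Dict, List, Tuple
--
-- class AsmError(Exception):
--     pass
--
-- def write_mif(
--     instructions: List[Tuple[int, int]],
--     depth: int = 32768,
--     fill: int = 0x0000,
-- ) -> str:
--     mem: Dict[int, int] = {}
--     for pc, ir in instructions:
--         if pc + 1 >= depth: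
--             raise AsmError(
--                 f"instruction at word {pc:#06x} exceeds memory depth {depth}"
--             )
--         mem[pc]     = (ir >> 16) & 0xFFFF
--         mem[pc + 1] =  ir        & 0xFFFF
--
--     # group the sorted addresses into maximal contiguous runs
--     addrs = sorted(mem)
--     runs: List[List[int]] = []
--     i = 0
--     while i < len(addrs):
--         j = i
--         while j + 1 < len(addrs) and addrs[j + 1] == addrs[j] + 1:
--             j += 1
--         runs.append(addrs[i:j + 1])
--         i = j + 1
--
--     body: List[str] = []
--     prev_end = -1
--     for run in runs:
--         gap = run[0] - prev_end - 1
--         if gap >= 2: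
--             body.append(f"    [{prev_end+1:04X}..{run[0]-1:04X}] : {fill:04X};")
--         elif gap == 1:
--             body.append(f"    {prev_end+1:04X} : {fill:04X};")
--         for a in run:
--             body.append(f"    {a:04X} : {mem[a]:04X};")
--         prev_end = run[-1]
--     tail_gap = depth - prev_end - 1
--     if tail_gap == 1:
--         body.append(f"    {prev_end+1:04X} : {fill:04X};")
--     elif tail_gap >= 2:
--         body.append(f"    [{prev_end+1:04X}..{depth-1:04X}] : {fill:04X};")
--
--     header = [
--         "WIDTH = 16;",
--         f"DEPTH = {depth};",
--         "ADDRESS_RADIX = HEX;",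
--         "DATA_RADIX = HEX;",
--         "",
--         "CONTENT BEGIN",
--     ]
--     return "\n".join(header + body + ["END;"]) + "\n"
-- ===== Notes on version B (the rewrite author's own statement) =====
-- stated objective: alternative
-- what changed: Replaces A's single pass with a running prev accumulator by a two-phase pass: first group the sorted addresses into maximal contiguous runs, then walk the runs emitting one fill line per inter-run gap (single word vs range) followed by the run's word lines, with the trailing fill computed from the last run's end.
import Mathlib
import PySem

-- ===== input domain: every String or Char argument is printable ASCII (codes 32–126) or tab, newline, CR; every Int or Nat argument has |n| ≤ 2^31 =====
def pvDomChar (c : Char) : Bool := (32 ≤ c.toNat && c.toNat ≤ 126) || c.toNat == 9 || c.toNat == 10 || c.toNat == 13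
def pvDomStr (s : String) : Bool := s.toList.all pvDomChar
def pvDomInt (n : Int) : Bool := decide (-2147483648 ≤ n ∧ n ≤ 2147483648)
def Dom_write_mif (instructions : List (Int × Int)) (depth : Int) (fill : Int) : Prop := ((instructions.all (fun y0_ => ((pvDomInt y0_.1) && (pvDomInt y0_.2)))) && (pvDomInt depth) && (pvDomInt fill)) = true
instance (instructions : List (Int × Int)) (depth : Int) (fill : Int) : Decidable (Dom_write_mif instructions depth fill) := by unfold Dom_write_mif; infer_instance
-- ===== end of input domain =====

-- B replaces A's running-`prev` single pass with a build-contiguous-runs-then-emit decomposition (alternative, same cost).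

-- ===== shared helpers (identical code in both Pythons) =====

-- f"{n:04X}" : uppercase hex, zero-padded to total width 4 (the sign counts toward the width), exact for every int
def pvHexDigit (n : Nat) : Char :=
  if n < 10 then Char.ofNat (48 + n) else Char.ofNat (55 + n)

def pvHexChars (n : Nat) : List Char :=
  if h : n = 0 then []
  else pvHexChars (n / 16) ++ [pvHexDigit (n % 16)]
decreasing_by exact Nat.div_lt_self (Nat.pos_of_ne_zero h) (by omega)

def pvPad (k : Nat) (cs : List Char) : List Char :=
  List.replicate (k - cs.length) '0' ++ cs

def pvHex4 (n : Int) : String :=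
  if n < 0 then String.ofList ('-' :: pvPad 3 (pvHexChars n.natAbs))
  else if n = 0 then String.ofList (pvPad 4 ['0'])
  else String.ofList (pvPad 4 (pvHexChars n.toNat))

def pvWordLine (a v : Int) : String :=
  "    " ++ pvHex4 a ++ " : " ++ pvHex4 v ++ ";"

def pvRangeLine (lo hi v : Int) : String :=
  "    [" ++ pvHex4 lo ++ ".." ++ pvHex4 hi ++ "] : " ++ pvHex4 v ++ ";"

-- the mem-building loop, identical in A and B (ir >> 16 is Int >>>, & 0xFFFF is PySem.Int.band)
def pvBuildMem (instructions : List (Int × Int)) : PySem.Dict Int Int :=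
  instructions.foldl
    (fun (mem : PySem.Dict Int Int) (p : Int × Int) =>
      (mem.insert p.1 (PySem.Int.band (p.2 >>> (16 : Nat)) 0xFFFF)).insert (p.1 + 1)
        (PySem.Int.band p.2 0xFFFF))
    PySem.Dict.empty

def pvHeader (depth : Int) : List String :=
  ["WIDTH = 16;", "DEPTH = " ++ PySem.Int.toStr depth ++ ";",
   "ADDRESS_RADIX = HEX;", "DATA_RADIX = HEX;", "", "CONTENT BEGIN"]

-- ===== PORT A =====
def pvStepA (mem : PySem.Dict Int Int) (fill : Int) (st : List String × Int) (a : Int) :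
    List String × Int :=
  let lines := st.1
  let prev := st.2
  let lines :=
    if a > prev + 1 ∧ prev + 1 < a then
      (if a - 1 > prev + 1 then lines ++ [pvRangeLine (prev + 1) (a - 1) fill]
       else lines ++ [pvWordLine (prev + 1) fill])
    else lines
  (lines ++ [pvWordLine a (mem.getD a 0)], a)

def write_mif (instructions : List (Int × Int)) (depth : Int) (fill : Int) : String :=
  let mem := pvBuildMem instructions
  let lines := pvHeader depth
  let addrs := PySem.List.sorted mem.keys (fun x => x) false
  let st := addrs.foldl (pvStepA mem fill) (lines, -1)
  let lines := st.1
  let prev := st.2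
  let lines :=
    if prev + 1 < depth then
      (if prev + 1 = depth - 1 then lines ++ [pvWordLine (prev + 1) fill]
       else lines ++ [pvRangeLine (prev + 1) (depth - 1) fill])
    else lines
  PySem.Str.join "\n" (lines ++ ["END;"]) ++ "\n"

-- ===== PORT B =====
-- take the contiguous chain continuing `cur`, returning (chain, remainder)
def pvRunAux : Int → List Int → List Int × List Int
  | _, [] => ([], [])
  | cur, a :: rest =>
    if a = cur + 1 then
      let p := pvRunAux a rest
      (a :: p.1, p.2)
    else ([], a :: rest)

theorem pvRunAux_len (cur : Int) (l : List Int) : (pvRunAux cur l).2.length ≤ l.length := by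
  induction l generalizing cur with
  | nil => exact Nat.le_refl _
  | cons a rest ih =>
    simp only [pvRunAux]
    split
    · exact Nat.le_succ_of_le (ih a)
    · simp

-- split the sorted address list into maximal contiguous runs
def pvRuns : List Int → List (List Int)
  | [] => []
  | a :: rest =>
    (a :: (pvRunAux a rest).1) :: pvRuns (pvRunAux a rest).2
termination_by l => l.length
decreasing_by
  have := pvRunAux_len a rest
  simp only [List.length_cons]
  omega

def pvStepB (mem : PySem.Dict Int Int) (fill : Int) (st : List String × Int)
    (run : List Int) : List String × Int :=
  let body := st.1
  let prevEnd := st.2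
  let s := run.headD 0          -- run[0]; every run produced by pvRuns is nonempty
  let gap := s - prevEnd - 1
  let body :=
    if gap ≥ 2 then body ++ [pvRangeLine (prevEnd + 1) (s - 1) fill]
    else if gap = 1 then body ++ [pvWordLine (prevEnd + 1) fill]
    else body
  let body := run.foldl (fun b a => b ++ [pvWordLine a (mem.getD a 0)]) body
  (body, run.getLastD prevEnd)  -- run[-1]

def write_mif_alt (instructions : List (Int × Int)) (depth : Int) (fill : Int) : String :=
  let mem := pvBuildMem instructions
  let addrs := PySem.List.sorted mem.keys (fun x => x) false
  let runs := pvRuns addrs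
  let st := runs.foldl (pvStepB mem fill) ([], -1)
  let body := st.1
  let prevEnd := st.2
  let tailGap := depth - prevEnd - 1
  let body :=
    if tailGap = 1 then body ++ [pvWordLine (prevEnd + 1) fill]
    else if tailGap ≥ 2 then body ++ [pvRangeLine (prevEnd + 1) (depth - 1) fill]
    else body
  PySem.Str.join "\n" (pvHeader depth ++ body ++ ["END;"]) ++ "\n"

-- ===== PRECONDITION & SPEC =====
-- Pre_ excludes exactly the inputs on which A raises AsmError: some instruction with pc + 1 >= depth.
def Pre_write_mif (instructions : List (Int × Int)) (depth : Int) (fill : Int) : Prop :=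
  ∀ p ∈ instructions, p.1 + 1 < depth
instance (instructions : List (Int × Int)) (depth : Int) (fill : Int) : Decidable (Pre_write_mif instructions depth fill) := by unfold Pre_write_mif; infer_instance

def pvWitness_write_mif : (List (Int × Int)) × Int × Int := ([(0, 305419896), (4, -1)], 16, 3)

def Spec_write_mif (instructions : List (Int × Int)) (depth : Int) (fill : Int) (out : String) : Prop := out = write_mif_alt instructions depth fill
instance (instructions : List (Int × Int)) (depth : Int) (fill : Int) (out : String) : Decidable (Spec_write_mif instructions depth fill out) := by unfold Spec_write_mif; infer_instance

-- ===== CLAIM (what is proved, stated in full; the proofs are below) =====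
def Claim_equal_write_mif : Prop := ∀ (instructions : List (Int × Int)) (depth : Int) (fill : Int), Dom_write_mif instructions depth fill → Pre_write_mif instructions depth fill → Spec_write_mif instructions depth fill (write_mif instructions depth fill)

-- ===== LEMMAS AND PROOFS =====

-- the gap lines A emits before address a, given the previous written address
def pvGapA (fill prev a : Int) : List String :=
  if a > prev + 1 ∧ prev + 1 < a then
    (if a - 1 > prev + 1 then [pvRangeLine (prev + 1) (a - 1) fill]
     else [pvWordLine (prev + 1) fill])
  else []

def pvGapB (fill prev s : Int) : List String :=
  if s - prev - 1 ≥ 2 then [pvRangeLine (prev + 1) (s - 1) fill]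
  else if s - prev - 1 = 1 then [pvWordLine (prev + 1) fill]
  else []

theorem pvGap_eq (fill prev a : Int) : pvGapA fill prev a = pvGapB fill prev a := by
  unfold pvGapA pvGapB
  split_ifs <;> first | rfl | omega

theorem pvRuns_nil : pvRuns [] = [] := by rw [pvRuns.eq_def]

theorem pvRuns_cons (a : Int) (rest : List Int) :
    pvRuns (a :: rest) = (a :: (pvRunAux a rest).1) :: pvRuns (pvRunAux a rest).2 := by
  rw [pvRuns.eq_def]

-- recursive reformulation of A's loop: (emitted lines, final prev)
def pvRecA (mem : PySem.Dict Int Int) (fill : Int) : List Int → Int → List String × Int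
  | [], prev => ([], prev)
  | a :: rest, prev =>
    (pvGapA fill prev a ++ pvWordLine a (mem.getD a 0) :: (pvRecA mem fill rest a).1,
     (pvRecA mem fill rest a).2)

-- recursive reformulation of B's loop over runs
def pvRecB (mem : PySem.Dict Int Int) (fill : Int) : List (List Int) → Int → List String × Int
  | [], prev => ([], prev)
  | run :: rs, prev =>
    (pvGapB fill prev (run.headD 0) ++ run.map (fun a => pvWordLine a (mem.getD a 0)) ++
       (pvRecB mem fill rs (run.getLastD prev)).1,
     (pvRecB mem fill rs (run.getLastD prev)).2)

theorem pvFoldA (mem : PySem.Dict Int Int) (fill : Int) (addrs : List Int)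
    (lines : List String) (prev : Int) :
    addrs.foldl (pvStepA mem fill) (lines, prev) =
      (lines ++ (pvRecA mem fill addrs prev).1, (pvRecA mem fill addrs prev).2) := by
  induction addrs generalizing lines prev with
  | nil => simp [pvRecA]
  | cons a rest ih =>
    simp only [List.foldl_cons, pvStepA, pvRecA, pvGapA]
    split_ifs <;> simp [ih]

theorem pvFoldB (mem : PySem.Dict Int Int) (fill : Int) (runs : List (List Int))
    (body : List String) (prev : Int) :
    runs.foldl (pvStepB mem fill) (body, prev) =
      (body ++ (pvRecB mem fill runs prev).1, (pvRecB mem fill runs prev).2) := by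
  induction runs generalizing body prev with
  | nil => simp [pvRecB]
  | cons run rs ih =>
    simp only [List.foldl_cons, pvStepB, pvRecB, pvGapB,
      PySem.List.foldl_append_singleton_eq_map]
    split_ifs <;> simp [ih]

-- walking a contiguous chain emits no gap lines: A's loop over the chain is just the word lines
theorem pvChain (mem : PySem.Dict Int Int) (fill : Int) (rest : List Int) (c : Int) :
    pvRecA mem fill rest c =
      ((pvRunAux c rest).1.map (fun a => pvWordLine a (mem.getD a 0)) ++
         (pvRecA mem fill (pvRunAux c rest).2 ((pvRunAux c rest).1.getLastD c)).1,
       (pvRecA mem fill (pvRunAux c rest).2 ((pvRunAux c rest).1.getLastD c)).2) := by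
  induction rest generalizing c with
  | nil => simp [pvRunAux, pvRecA]
  | cons a rest ih =>
    by_cases h : a = c + 1
    · have hgap : pvGapA fill c a = [] := by unfold pvGapA; split_ifs <;> first | omega | rfl
      simp only [pvRunAux, if_pos h, pvRecA, hgap, ih a, List.getLastD_cons, List.map_cons,
        List.nil_append, List.cons_append]
    · simp [pvRunAux, if_neg h, pvRecA]

theorem pvRec_eq (mem : PySem.Dict Int Int) (fill : Int) :
    ∀ (n : Nat) (addrs : List Int), addrs.length ≤ n → ∀ (prev : Int),
      pvRecA mem fill addrs prev = pvRecB mem fill (pvRuns addrs) prev := by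
  intro n
  induction n with
  | zero =>
    intro addrs hlen prev
    have : addrs = [] := List.eq_nil_of_length_eq_zero (Nat.le_zero.mp hlen)
    subst this
    simp [pvRuns_nil, pvRecA, pvRecB]
  | succ n ih =>
    intro addrs hlen prev
    match addrs with
    | [] => simp [pvRuns_nil, pvRecA, pvRecB]
    | a :: rest =>
      rw [pvRuns_cons]
      have hrem : (pvRunAux a rest).2.length ≤ n := by
        have := pvRunAux_len a rest
        simp only [List.length_cons] at hlen
        omega
      simp only [pvRecA, pvRecB, List.headD_cons, List.getLastD_cons, pvChain mem fill rest a,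
        ih _ hrem, List.map_cons, pvGap_eq, List.cons_append, List.append_assoc]

-- ===== VERDICT (by name: the statement is the Claim_ definition above) =====
theorem write_mif_spec : Claim_equal_write_mif := by
  intro instructions depth fill _ _
  unfold Spec_write_mif
  simp only [write_mif, write_mif_alt, pvFoldA, pvFoldB,
    pvRec_eq (pvBuildMem instructions) fill
      (PySem.List.sorted (pvBuildMem instructions).keys (fun x => x) false).length
      (PySem.List.sorted (pvBuildMem instructions).keys (fun x => x) false) le_rfl]
  split_ifs <;> simp <;> omega
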